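-- pv_equiv track=rewrite | github.com/DYShin1/algorithm | 프로그래머스/1/12930. 이상한 문자 만들기/이상한 문자 만들기.py | solution
-- ===== SOURCE A (Python) =====
-- def solution(s):
--     answer = ''
--     tmp = s.split(' ')
--     for i in tmp:
--         for j in range(len(i)):
--             if j % 2 == 0:
--                 answer += i[j].upper()
--             else:
--                 answer += i[j].lower()
--         if len(answer) == len(s):
--             break
--         answer += ' '
--     return answer
-- ===== SOURCE B (Python) =====
-- def solution(s):
--     out = []
--     idx = 0
--     for ch in s:
--         if ch == ' ':
--             out.append(ch)
--             idx = 0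
--         else:
--             out.append(ch.upper() if idx % 2 == 0 else ch.lower())
--             idx += 1
--     return ''.join(out)
-- ===== Notes on version B (the rewrite author's own statement) =====
-- stated objective: simpler
-- what changed: Replaced the split-into-words plus index-based nested loop with break by a single flat pass over the characters carrying a counter that resets on spaces.
import Mathlib
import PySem

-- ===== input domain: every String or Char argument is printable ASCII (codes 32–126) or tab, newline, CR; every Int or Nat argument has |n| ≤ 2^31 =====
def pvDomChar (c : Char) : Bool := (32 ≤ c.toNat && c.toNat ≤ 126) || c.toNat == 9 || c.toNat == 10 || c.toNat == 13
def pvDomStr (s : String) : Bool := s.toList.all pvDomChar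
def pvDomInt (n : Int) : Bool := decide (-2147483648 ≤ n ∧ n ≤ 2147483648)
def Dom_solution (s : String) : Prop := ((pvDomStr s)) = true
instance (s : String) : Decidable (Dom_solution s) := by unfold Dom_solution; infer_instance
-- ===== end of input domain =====

-- B replaces A's split-into-words + nested index loop with break by one flat pass carrying a reset counter (simpler decomposition, same cost).


-- ===== PORT A =====
-- inner loop: for j in range(len(i)): answer += i[j].upper() / i[j].lower()
def pvInnerA (w : List Char) (answer : List Char) : List Char :=
  (PySem.List.pyRange 0 (PySem.List.len w) 1).foldl
    (fun ans j =>
      ans ++ [if PySem.Int.mod j 2 == 0 then PySem.Chars.upperChar (PySem.List.pyGetD w j ' ')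
              else PySem.Chars.lowerChar (PySem.List.pyGetD w j ' ')]) answer

-- outer loop over tmp with the 'if len(answer) == len(s): break' and 'answer += " "' steps
def pvOuterA (n : Nat) : List (List Char) → List Char → List Char
  | [], answer => answer
  | w :: ws, answer =>
    let answer' := pvInnerA w answer
    if answer'.length = n then answer'
    else pvOuterA n ws (answer' ++ [' '])

def solution (s : String) : String :=
  String.ofList (pvOuterA s.toList.length (PySem.Chars.splitOn s.toList [' ']) [])

-- ===== PORT B =====
-- one flat pass: state = (accumulated output, counter reset on ' ')
def pvStepB (st : List Char × Nat) (c : Char) : List Char × Nat :=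
  if c == ' ' then (st.1 ++ [c], 0)
  else (st.1 ++ [if st.2 % 2 == 0 then PySem.Chars.upperChar c else PySem.Chars.lowerChar c], st.2 + 1)

def solution_alt (s : String) : String :=
  String.ofList (s.toList.foldl pvStepB ([], 0)).1

-- ===== PRECONDITION & SPEC =====
def Spec_solution (s : String) (out : String) : Prop := out = solution_alt s
instance (s : String) (out : String) : Decidable (Spec_solution s out) := by unfold Spec_solution; infer_instance

-- ===== CLAIM (what is proved, stated in full; the proofs are below) =====
def Claim_equal_solution : Prop := ∀ (s : String), Dom_solution s → Spec_solution s (solution s)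

-- ===== LEMMAS AND PROOFS =====

-- alternation of one word starting at parity index k
def pvWAlt : Nat → List Char → List Char
  | _, [] => []
  | k, c :: r =>
    (if k % 2 == 0 then PySem.Chars.upperChar c else PySem.Chars.lowerChar c) :: pvWAlt (k + 1) r

-- what B computes on the remaining characters, counter k
def pvBAlt : Nat → List Char → List Char
  | _, [] => []
  | k, c :: r =>
    if c == ' ' then ' ' :: pvBAlt 0 r
    else (if k % 2 == 0 then PySem.Chars.upperChar c else PySem.Chars.lowerChar c) :: pvBAlt (k + 1) r

-- reference single-space split
def pvSp : List Char → List (List Char)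
  | [] => [[]]
  | c :: r =>
    if c == ' ' then [] :: pvSp r
    else
      match pvSp r with
      | [] => [[c]]
      | w :: ws => (c :: w) :: ws

def pvConsHead (pre : List Char) : List (List Char) → List (List Char)
  | [] => [pre]
  | w :: ws => (pre ++ w) :: ws

def pvJoinAlt : Nat → List (List Char) → List Char
  | _, [] => []
  | k, [w] => pvWAlt k w
  | k, w :: ws => pvWAlt k w ++ ' ' :: pvJoinAlt 0 ws

def pvBLen : List (List Char) → Nat
  | [] => 0
  | [w] => w.length
  | w :: ws => w.length + 1 + pvBLen ws

theorem pvSp_ne_nil (l : List Char) : pvSp l ≠ [] := by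
  cases l with
  | nil => simp [pvSp]
  | cons c r =>
    simp only [pvSp]
    split
    · simp
    · cases h : pvSp r <;> simp

theorem pvConsHead_nil (ws : List (List Char)) (h : ws ≠ []) : pvConsHead [] ws = ws := by
  cases ws with
  | nil => exact absurd rfl h
  | cons w ws => simp [pvConsHead]

theorem pvGo_spec (fuel : Nat) : ∀ (l cur : List Char) (acc : List (List Char)), l.length < fuel →
    PySem.Chars.splitOn.go [' '] fuel l cur acc
      = acc.reverse ++ pvConsHead cur.reverse (pvSp l) := by
  induction fuel with
  | zero => intro l cur acc h; omega
  | succ f ih =>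
    intro l cur acc h
    cases l with
    | nil =>
      rw [PySem.Chars.splitOn.go.eq_def]
      simp [pvSp, pvConsHead]
    | cons c rest =>
      rw [PySem.Chars.splitOn.go.eq_def]
      by_cases hc : c = ' '
      · subst hc
        have hpre : [' '].isPrefixOf (' ' :: rest) = true := by simp [List.isPrefixOf]
        simp only [hpre, if_pos, List.length_singleton, List.drop_succ_cons, List.drop_zero]
        rw [ih rest [] (cur.reverse :: acc) (by simpa using Nat.lt_of_succ_lt_succ h)]
        have hsp : pvSp (' ' :: rest) = [] :: pvSp rest := by simp [pvSp]
        rw [List.reverse_nil, pvConsHead_nil _ (pvSp_ne_nil rest), hsp]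
        simp [pvConsHead]
      · have hpre : [' '].isPrefixOf (c :: rest) = false := by
          simp [List.isPrefixOf]; exact fun hh => hc hh.symm
        simp only [hpre, Bool.false_eq_true, if_false]
        rw [ih rest (c :: cur) acc (by simpa using Nat.lt_of_succ_lt_succ h)]
        have hsp : pvSp (c :: rest) =
            match pvSp rest with
            | [] => [[c]]
            | w :: ws => (c :: w) :: ws := by
          simp [pvSp, hc]
        rw [hsp]
        cases hr : pvSp rest with
        | nil => simp [pvConsHead]
        | cons w ws => simp [pvConsHead]

theorem pvSplitOn_eq (l : List Char) : PySem.Chars.splitOn l [' '] = pvSp l := by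
  unfold PySem.Chars.splitOn
  rw [pvGo_spec (l.length + 1) l [] [] (by omega)]
  simp [pvConsHead_nil _ (pvSp_ne_nil l)]

theorem pvWAlt_length (k : Nat) (w : List Char) : (pvWAlt k w).length = w.length := by
  induction w generalizing k with
  | nil => simp [pvWAlt]
  | cons c r ih => simp [pvWAlt, ih]

theorem pvInnerA_aux (w : List Char) (n : Nat) (acc : List Char) (hn : n ≤ w.length) :
    (PySem.List.pyRange n w.length 1).foldl
      (fun ans j =>
        ans ++ [if PySem.Int.mod j 2 == 0 then PySem.Chars.upperChar (PySem.List.pyGetD w j ' ')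
                else PySem.Chars.lowerChar (PySem.List.pyGetD w j ' ')]) acc
      = acc ++ pvWAlt n (w.drop n) := by
  by_cases h : n = w.length
  · subst h
    rw [PySem.List.pyRange_one_eq_nil (by omega)]
    simp [pvWAlt]
  · have hlt : n < w.length := lt_of_le_of_ne hn h
    rw [PySem.List.pyRange_one_cons (by exact_mod_cast hlt)]
    have hcast : ((n : Int) + 1) = ((n + 1 : Nat) : Int) := by push_cast; ring
    rw [List.foldl_cons, hcast, pvInnerA_aux w (n + 1) _ (by omega)]
    have hget : PySem.List.pyGetD w (n : Int) ' ' = w[n] := by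
      simp [PySem.List.pyGetD_natCast, List.getD_eq_getElem?_getD, hlt]
    have hmod : PySem.Int.mod (n : Int) 2 = ((n % 2 : Nat) : Int) := by
      unfold PySem.Int.mod; rw [Int.fmod_eq_emod]; omega
    have hdrop : w.drop n = w[n] :: w.drop (n + 1) := by
      exact (List.getElem_cons_drop hlt).symm
    rw [hdrop]
    simp only [pvWAlt, hget, hmod]
    have hb : (((n % 2 : Nat) : Int) == 0) = ((n % 2) == 0) := by
      cases Nat.mod_two_eq_zero_or_one n with
      | inl h => simp [h]
      | inr h => simp [h]
    rw [hb]
    simp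
termination_by w.length - n

theorem pvInnerA_eq (w acc : List Char) : pvInnerA w acc = acc ++ pvWAlt 0 w := by
  unfold pvInnerA
  have := pvInnerA_aux w 0 acc (by omega)
  simpa [PySem.List.len] using this

theorem pvOuterA_eq (ws : List (List Char)) : ∀ (a : List Char) (n : Nat), ws ≠ [] →
    a.length + pvBLen ws = n → pvOuterA n ws a = a ++ pvJoinAlt 0 ws := by
  induction ws with
  | nil => intro a n h; exact absurd rfl h
  | cons w ws ih =>
    intro a n _ hlen
    cases ws with
    | nil =>
      simp only [pvOuterA, pvInnerA_eq]
      have : (a ++ pvWAlt 0 w).length = n := by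
        simp [pvWAlt_length]; simpa [pvBLen] using hlen
      simp [this, pvJoinAlt]
    | cons v vs =>
      have hstep : pvOuterA n (w :: v :: vs) a =
          (if (pvInnerA w a).length = n then pvInnerA w a
           else pvOuterA n (v :: vs) (pvInnerA w a ++ [' '])) := rfl
      rw [hstep, pvInnerA_eq]
      have hne : (a ++ pvWAlt 0 w).length ≠ n := by
        simp only [List.length_append, pvWAlt_length]
        have : pvBLen (w :: v :: vs) = w.length + 1 + pvBLen (v :: vs) := rfl
        omega
      rw [if_neg hne, ih _ n (by simp) (by
        simp only [List.length_append, List.length_cons, List.length_nil, pvWAlt_length]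
        have : pvBLen (w :: v :: vs) = w.length + 1 + pvBLen (v :: vs) := rfl
        omega)]
      simp [pvJoinAlt]

theorem pvBLen_sp (l : List Char) : pvBLen (pvSp l) = l.length := by
  induction l with
  | nil => simp [pvSp, pvBLen]
  | cons c r ih =>
    by_cases hc : c = ' '
    · subst hc
      have hsp : pvSp (' ' :: r) = [] :: pvSp r := by simp [pvSp]
      rw [hsp]
      cases hr : pvSp r with
      | nil => exact absurd hr (pvSp_ne_nil r)
      | cons w ws =>
        have : pvBLen ([] :: w :: ws) = 0 + 1 + pvBLen (w :: ws) := rfl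
        rw [this, ← hr, ih]
        simp [Nat.add_comm]
    · have hsp : pvSp (c :: r) =
          match pvSp r with
          | [] => [[c]]
          | w :: ws => (c :: w) :: ws := by simp [pvSp, hc]
      rw [hsp]
      cases hr : pvSp r with
      | nil => exact absurd hr (pvSp_ne_nil r)
      | cons w ws =>
        cases ws with
        | nil =>
          have h1 : pvBLen [c :: w] = w.length + 1 := by simp [pvBLen]
          have h2 : pvBLen [w] = w.length := rfl
          rw [h1]
          rw [hr, h2] at ih
          simp [← ih]
        | cons v vs =>
          have h1 : pvBLen ((c :: w) :: v :: vs) = (w.length + 1) + 1 + pvBLen (v :: vs) := rfl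
          have h2 : pvBLen (w :: v :: vs) = w.length + 1 + pvBLen (v :: vs) := rfl
          rw [h1]
          rw [hr, h2] at ih
          simp only [List.length_cons]
          omega

theorem pvJoinAlt_sp (l : List Char) : ∀ k, pvJoinAlt k (pvSp l) = pvBAlt k l := by
  induction l with
  | nil => intro k; simp [pvSp, pvJoinAlt, pvWAlt, pvBAlt]
  | cons c r ih =>
    intro k
    by_cases hc : c = ' '
    · subst hc
      have hsp : pvSp (' ' :: r) = [] :: pvSp r := by simp [pvSp]
      rw [hsp]
      cases hr : pvSp r with
      | nil => exact absurd hr (pvSp_ne_nil r)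
      | cons w ws =>
        have : pvJoinAlt k ([] :: w :: ws) = pvWAlt k [] ++ ' ' :: pvJoinAlt 0 (w :: ws) := rfl
        rw [this, ← hr, ih 0]
        simp [pvWAlt, pvBAlt]
    · have hsp : pvSp (c :: r) =
          match pvSp r with
          | [] => [[c]]
          | w :: ws => (c :: w) :: ws := by simp [pvSp, hc]
      rw [hsp]
      cases hr : pvSp r with
      | nil => exact absurd hr (pvSp_ne_nil r)
      | cons w ws =>
        have hB : pvBAlt k (c :: r) =
            (if k % 2 == 0 then PySem.Chars.upperChar c else PySem.Chars.lowerChar c) :: pvBAlt (k + 1) r := by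
          simp [pvBAlt, hc]
        rw [hB, ← ih (k + 1), hr]
        cases ws with
        | nil => simp [pvJoinAlt, pvWAlt]
        | cons v vs => simp [pvJoinAlt, pvWAlt]

theorem pvFoldB_eq (l : List Char) : ∀ (acc : List Char) (k : Nat),
    (l.foldl pvStepB (acc, k)).1 = acc ++ pvBAlt k l := by
  induction l with
  | nil => intro acc k; simp [pvBAlt]
  | cons c r ih =>
    intro acc k
    simp only [List.foldl_cons]
    by_cases hc : c = ' '
    · subst hc
      have hstep : pvStepB (acc, k) ' ' = (acc ++ [' '], 0) := by simp [pvStepB]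
      rw [hstep, ih]
      simp [pvBAlt]
    · have hcb : (c == ' ') = false := by simp [hc]
      have hstep : pvStepB (acc, k) c =
          (acc ++ [if k % 2 == 0 then PySem.Chars.upperChar c else PySem.Chars.lowerChar c], k + 1) := by
        simp [pvStepB, hcb]
      rw [hstep, ih]
      have : pvBAlt k (c :: r) =
          (if k % 2 == 0 then PySem.Chars.upperChar c else PySem.Chars.lowerChar c) :: pvBAlt (k + 1) r := by
        simp [pvBAlt, hc]
      rw [this]
      simp

-- ===== VERDICT (by name: the statement is the Claim_ definition above) =====
theorem solution_spec : Claim_equal_solution := by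
  intro s _
  unfold Spec_solution solution solution_alt
  rw [pvSplitOn_eq, pvOuterA_eq (pvSp s.toList) [] s.toList.length (pvSp_ne_nil _)
        (by simpa using pvBLen_sp s.toList),
      pvJoinAlt_sp, pvFoldB_eq]
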